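-- pv_equiv track=rewrite | github.com/its-mayank/CS311_Assignment_Datalink_layer_Simulation | datalink.py | modulus_2_division
-- ===== SOURCE A (Python) =====
-- def xor(a, b):
--     result = []
--     for i in range(1, len(b)):
--         if a[i] == b[i]:
--             result.append('0')
--         else:
--             result.append('1')
--
--     return ''.join(result)
--
-- def modulus_2_division(divident, divisor):
--     pick = len(divisor)
--     tmp = divident[0 : pick]
--
--     while pick < len(divident):
--
--         if tmp[0] == '1':
--             tmp = xor(divisor, tmp) + divident[pick]
--
--         else:
--             tmp = xor('0'*pick, tmp) + divident[pick]
--         pick += 1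
--
--     if tmp[0] == '1':
--         tmp = xor(divisor, tmp)
--     else:
--         tmp = xor('0'*pick, tmp)
--
--     checkword = tmp
--     return checkword
-- ===== SOURCE B (Python) =====
-- def modulus_2_division(divident, divisor):
--     # Divide and conquer: the remainder of a concatenation only depends on the
--     # remainder of its prefix, so halve the work and recombine.
--     m = len(divisor)
--
--     def rem(s):
--         if len(s) <= m:
--             pat = divisor if s[0] == '1' else '0' * m
--             return ''.join('1' if a != b else '0' for a, b in zip(s[1:], pat[1:]))
--         half = (len(s) + m) // 2
--         return rem(rem(s[:half]) + s[half:])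
--
--     return rem(divident)
-- ===== Notes on version B (the rewrite author's own statement) =====
-- stated objective: alternative
-- what changed: B computes the checkword by divide and conquer on the composition law rem(s1+s2) = rem(rem(s1)+s2): it recursively halves the dividend and recombines the prefix remainder with the remaining suffix, instead of A's iterative left-to-right sliding window; Pre_ excludes only empty inputs, on which A raises IndexError.
import Mathlib
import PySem

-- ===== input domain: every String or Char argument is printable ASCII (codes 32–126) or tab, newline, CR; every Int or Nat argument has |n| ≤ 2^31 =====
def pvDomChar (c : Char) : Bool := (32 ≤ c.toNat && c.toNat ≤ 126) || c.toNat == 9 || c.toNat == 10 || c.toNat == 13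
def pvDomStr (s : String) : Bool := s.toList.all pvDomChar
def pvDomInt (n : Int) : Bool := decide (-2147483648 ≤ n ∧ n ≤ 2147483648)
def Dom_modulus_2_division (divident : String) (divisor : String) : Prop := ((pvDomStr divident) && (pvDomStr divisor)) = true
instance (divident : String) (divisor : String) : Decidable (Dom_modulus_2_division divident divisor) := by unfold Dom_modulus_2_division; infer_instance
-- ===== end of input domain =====

-- B replaces A's iterative sliding-window division by divide and conquer on
-- the composition law rem(s1 + s2) = rem(rem(s1) + s2).

-- ===== PORT A =====
def pyXorA (a : List Char) (b : List Char) : List Char :=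
  (PySem.List.pyRange 1 (b.length : Int) 1).foldl
    (fun result i =>
      result ++ [if PySem.List.pyGetD a i '?' == PySem.List.pyGetD b i '?' then '0' else '1']) []

def aLoop (dl : List Char) (ds : List Char) (pick : Nat) (tmp : List Char) : Nat × List Char :=
  if _h : pick < dl.length then
    let c := PySem.List.pyGetD dl (pick : Int) '?'
    let tmp' := if PySem.List.pyGetD tmp 0 '?' == '1' then pyXorA ds tmp ++ [c]
                else pyXorA (List.replicate pick '0') tmp ++ [c]
    aLoop dl ds (pick + 1) tmp'
  else (pick, tmp)
termination_by dl.length - pick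

def modulus_2_division (divident : String) (divisor : String) : String :=
  let dl := divident.toList
  let ds := divisor.toList
  let pick := ds.length
  let tmp0 := PySem.List.slice dl (some 0) (some (pick : Int))
  let st := aLoop dl ds pick tmp0
  let tmp := if PySem.List.pyGetD st.2 0 '?' == '1' then pyXorA ds st.2
             else pyXorA (List.replicate st.1 '0') st.2
  String.ofList tmp

-- ===== PORT B =====
-- rem(s) from Source B; s[0] is PySem.List.pyGetD (IndexError only outside Pre_),
-- s[:half]/s[half:]/s[1:]/pat[1:] are take/drop (the bounds are nonnegative),
-- and ''.join('1' if a != b else '0' for a, b in zip(..)) is the zipWith.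
-- The inner 'if _h : … < s.length' is only a totality guard: for a nonempty
-- divisor the recombined string is always strictly shorter (proved below).
def remBAux (dsr : List Char) (m : Nat) (s : List Char) : List Char :=
  if s.length ≤ m then
    let pat := if PySem.List.pyGetD s 0 '?' == '1' then dsr else List.replicate m '0'
    List.zipWith (fun a b => if a != b then '1' else '0') (s.drop 1) (pat.drop 1)
  else
    let half := (s.length + m) / 2
    let t := remBAux dsr m (s.take half) ++ s.drop half
    if _h : t.length < s.length then remBAux dsr m t else t
termination_by s.length
decreasing_by
  · simp only [List.length_take]
    omega
  · exact _h

def modulus_2_division_alt (divident : String) (divisor : String) : String :=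
  String.ofList (remBAux divisor.toList divisor.toList.length divident.toList)

-- ===== PRECONDITION & SPEC =====
-- Pre_ excludes exactly the inputs on which A raises IndexError: an empty
-- divident or an empty divisor.
def Pre_modulus_2_division (divident : String) (divisor : String) : Prop :=
  divident.toList ≠ [] ∧ divisor.toList ≠ []
instance (divident : String) (divisor : String) : Decidable (Pre_modulus_2_division divident divisor) := by
  unfold Pre_modulus_2_division; infer_instance
def pvWitness_modulus_2_division : String × String := ("100100", "1101")
def Spec_modulus_2_division (divident : String) (divisor : String) (out : String) : Prop := out = modulus_2_division_alt divident divisor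
instance (divident : String) (divisor : String) (out : String) : Decidable (Spec_modulus_2_division divident divisor out) := by unfold Spec_modulus_2_division; infer_instance

-- ===== CLAIM (what is proved, stated in full; the proofs are below) =====
def Claim_equal_modulus_2_division : Prop := ∀ (divident : String) (divisor : String), Dom_modulus_2_division divident divisor → Pre_modulus_2_division divident divisor → Spec_modulus_2_division divident divisor (modulus_2_division divident divisor)

-- ===== LEMMAS AND PROOFS =====

-- ---- the common abstraction: one window reduction, and the reduction chain ----
def red1 (ds w : List Char) : List Char :=
  if PySem.List.pyGetD w 0 '?' == '1' then pyXorA ds w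
  else pyXorA (List.replicate ds.length '0') w

def gA (ds s : List Char) : List Char :=
  red1 ds ((s.drop ds.length).foldl (fun w c => red1 ds w ++ [c]) (s.take ds.length))

theorem pyXorA_eq_map (a b : List Char) :
    pyXorA a b = (List.range (b.length - 1)).map
      (fun k => if a.getD (k + 1) '?' == b.getD (k + 1) '?' then '0' else '1') := by
  rw [pyXorA, PySem.List.foldl_append_singleton_eq_map, List.nil_append,
      PySem.List.pyRange_one, List.map_map]
  have e : ((b.length : Int) - 1).toNat = b.length - 1 := by omega
  rw [e]
  apply List.map_congr_left
  intro k _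
  show (if PySem.List.pyGetD a (1 + (k : Int)) '?' == PySem.List.pyGetD b (1 + (k : Int)) '?' then '0' else '1') = _
  rw [show (1 : Int) + (k : Int) = ((k + 1 : Nat) : Int) from by push_cast; ring,
      PySem.List.pyGetD_natCast, PySem.List.pyGetD_natCast]

theorem pyXorA_length (a b : List Char) : (pyXorA a b).length = b.length - 1 := by
  rw [pyXorA_eq_map]
  simp

theorem charBeq_comm (a b : Char) : (a == b) = (b == a) := by
  by_cases h : a = b
  · subst h; rfl
  · rw [beq_eq_false_iff_ne.mpr h, beq_eq_false_iff_ne.mpr (Ne.symm h)]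

theorem pyXorA_replicate (p q : Nat) (w : List Char) (hp : w.length ≤ p) (hq : w.length ≤ q) :
    pyXorA (List.replicate p '0') w = pyXorA (List.replicate q '0') w := by
  rw [pyXorA_eq_map, pyXorA_eq_map]
  apply List.map_congr_left
  intro k hk
  rw [List.mem_range] at hk
  rw [List.getD_eq_getElem (List.replicate p '0') '?' (by simp; omega),
      List.getD_eq_getElem (List.replicate q '0') '?' (by simp; omega)]
  simp

theorem red1_length (ds w : List Char) : (red1 ds w).length = w.length - 1 := by
  rw [red1]
  split <;> exact pyXorA_length _ _

theorem chain_length (ds : List Char) :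
    ∀ (cs : List Char) (w : List Char), 1 ≤ w.length →
      (cs.foldl (fun w c => red1 ds w ++ [c]) w).length = w.length := by
  intro cs
  induction cs with
  | nil => intro w _; rfl
  | cons c cs ih =>
      intro w hw
      simp only [List.foldl_cons]
      have h1 : (red1 ds w ++ [c]).length = w.length := by
        simp [red1_length]
        omega
      rw [ih _ (by omega), h1]

theorem gA_length (ds s : List Char) (hm : 1 ≤ ds.length) (hs : ds.length ≤ s.length) :
    (gA ds s).length = ds.length - 1 := by
  rw [gA, red1_length, chain_length ds _ _ (by simp; omega)]
  simp
  omega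

-- B's base case is exactly one window reduction
theorem zip_eq_pyXorA (pat s : List Char) (h : s.length ≤ pat.length) :
    List.zipWith (fun a b => if a != b then '1' else '0') (s.drop 1) (pat.drop 1)
      = pyXorA pat s := by
  rw [pyXorA_eq_map]
  apply List.ext_getElem
  · simp
    omega
  · intro k hk1 hk2
    have hk : k < s.length - 1 := by simpa using hk2
    simp only [List.getElem_zipWith, List.getElem_map, List.getElem_range, List.getElem_drop]
    rw [List.getD_eq_getElem _ _ (by omega), List.getD_eq_getElem _ _ (by omega)]
    rw [charBeq_comm]
    simp only [show k + 1 = 1 + k from by omega]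
    by_cases he : s[1 + k]'(by omega) = pat[1 + k]'(by omega)
    · rw [if_neg (by simp [he]), if_pos (by simp [he])]
    · rw [if_pos (bne_iff_ne.mpr he), if_neg (by simp [he])]

-- the A-side loop is the reduction chain
theorem loopA_chain (dl ds : List Char) (m : Nat) (hm : ds.length = m) (h1 : 1 ≤ m) :
    ∀ (cs : List Char) (pick : Nat) (w : List Char),
      w.length = m → m ≤ pick → pick + cs.length = dl.length → dl.drop pick = cs →
      aLoop dl ds pick w = (dl.length, cs.foldl (fun w c => red1 ds w ++ [c]) w) := by
  intro cs
  induction cs with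
  | nil =>
      intro pick w hw hp hlen _
      rw [aLoop, dif_neg (by simp at hlen; omega)]
      simp at hlen
      simp [hlen]
  | cons c cs ih =>
      intro pick w hw hp hlen hdrop
      have hlt : pick < dl.length := by simp at hlen; omega
      have hc : PySem.List.pyGetD dl (pick : Int) '?' = c := by
        rw [PySem.List.pyGetD_natCast]
        have h0 : (dl.drop pick)[0]? = dl[pick + 0]? := List.getElem?_drop
        rw [hdrop] at h0
        simp only [Nat.add_zero] at h0
        simp [List.getD, ← h0]
      have hstep : (if PySem.List.pyGetD w 0 '?' == '1' then pyXorA ds w ++ [c]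
            else pyXorA (List.replicate pick '0') w ++ [c]) = red1 ds w ++ [c] := by
        rw [red1]
        split
        · rfl
        · rw [pyXorA_replicate pick ds.length w (by omega) (by omega)]
      rw [aLoop, dif_pos hlt]
      simp only [hc, hstep]
      rw [ih (pick + 1) (red1 ds w ++ [c]) (by simp [red1_length]; omega) (by omega)
            (by simp at hlen ⊢; omega)
            (by rw [← List.tail_drop, hdrop]; rfl)]
      simp [List.foldl_cons]

-- A computes the reduction chain of the whole dividend
theorem A_model (dv ds : String) (h1 : dv.toList ≠ []) (h2 : ds.toList ≠ []) :
    modulus_2_division dv ds = String.ofList (gA ds.toList dv.toList) := by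
  set dl := dv.toList with hdl
  set dsl := ds.toList with hdsl
  have hm1 : 1 ≤ dsl.length := List.length_pos_iff.mpr h2
  simp only [modulus_2_division, ← hdl, ← hdsl]
  rw [show PySem.List.slice dl (some 0) (some ((dsl.length : Nat) : Int)) = dl.take dsl.length from by
        rw [PySem.List.slice_zero_start, PySem.List.slice_to_natCast]]
  by_cases hnm : dl.length ≤ dsl.length
  · -- the while loop does not run
    rw [aLoop, dif_neg (by simp [List.length_take]; omega)]
    simp only []
    rw [gA, show dl.drop dsl.length = [] from List.drop_eq_nil_of_le hnm, List.foldl_nil, red1]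
  · -- the loop consumes dl.drop dsl.length
    rw [loopA_chain dl dsl dsl.length rfl hm1 (dl.drop dsl.length) dsl.length (dl.take dsl.length)
          (by simp; omega) (le_refl _) (by simp; omega) rfl]
    simp only []
    rw [gA, red1]
    have hwl : ((dl.drop dsl.length).foldl (fun w c => red1 dsl w ++ [c]) (dl.take dsl.length)).length
        = dsl.length := by
      rw [chain_length dsl _ _ (by simp; omega)]
      simp
      omega
    split
    · rfl
    · rw [pyXorA_replicate dl.length dsl.length _ (by omega) (by omega)]

-- the composition law: the remainder of a concatenation only depends on the
-- remainder of its prefix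
theorem gA_comp (ds s1 s2 : List Char) (hm : 1 ≤ ds.length) (h1 : ds.length ≤ s1.length)
    (h2 : s2 ≠ []) :
    gA ds (gA ds s1 ++ s2) = gA ds (s1 ++ s2) := by
  obtain ⟨c, s2', hs2⟩ : ∃ c s2', s2 = c :: s2' := by
    cases hc : s2 with
    | nil => exact absurd hc h2
    | cons a b => exact ⟨a, b, rfl⟩
  subst hs2
  set m := ds.length with hmm
  set W1 := (s1.drop m).foldl (fun w c => red1 ds w ++ [c]) (s1.take m) with hW1
  have hW1len : W1.length = m := by
    rw [hW1, chain_length ds _ _ (by simp; omega)]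
    simp
    omega
  have hg1 : gA ds s1 = red1 ds W1 := rfl
  have hg1len : (gA ds s1).length = m - 1 := by rw [hg1, red1_length, hW1len]
  -- left side: take m / drop m of (red1 W1 ++ c :: s2')
  have htake : (gA ds s1 ++ c :: s2').take m = red1 ds W1 ++ [c] := by
    rw [List.take_append, hg1len, show m - (m - 1) = 1 from by omega,
        List.take_of_length_le (by rw [hg1len]; omega), hg1]
    rfl
  have hdrop : (gA ds s1 ++ c :: s2').drop m = s2' := by
    rw [List.drop_append, hg1len, show m - (m - 1) = 1 from by omega,
        List.drop_of_length_le (by rw [hg1len]; omega)]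
    rfl
  -- right side: take m / drop m of (s1 ++ c :: s2')
  have htake2 : (s1 ++ c :: s2').take m = s1.take m := List.take_append_of_le_length h1
  have hdrop2 : (s1 ++ c :: s2').drop m = s1.drop m ++ c :: s2' := List.drop_append_of_le_length h1
  conv_lhs => rw [gA]
  conv_rhs => rw [gA]
  rw [htake, hdrop, htake2, hdrop2, List.foldl_append, ← hW1]
  simp only [List.foldl_cons]

-- B computes the same chain, by strong induction on the length
theorem remB_model (ds : List Char) (hds : ds ≠ []) :
    ∀ (k : Nat) (s : List Char), s.length ≤ k → s ≠ [] →
      remBAux ds ds.length s = gA ds s := by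
  have hm1 : 1 ≤ ds.length := List.length_pos_iff.mpr hds
  intro k
  induction k with
  | zero =>
      intro s hk hne
      exact absurd (List.length_eq_zero_iff.mp (by omega)) hne
  | succ k ih =>
      intro s hk hne
      by_cases hle : s.length ≤ ds.length
      · -- base window
        rw [remBAux, if_pos hle, gA,
            show s.drop ds.length = [] from List.drop_eq_nil_of_le hle, List.foldl_nil,
            List.take_of_length_le hle, red1]
        split
        · exact zip_eq_pyXorA ds s hle
        · exact (zip_eq_pyXorA (List.replicate ds.length '0') s (by simp; omega)).trans rfl
      · rw [remBAux, if_neg hle]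
        simp only []
        push_neg at hle
        set half := (s.length + ds.length) / 2 with hhalf
        have hhm : ds.length ≤ half := by omega
        have hhlt : half < s.length := by omega
        have hh1 : 1 ≤ half := by omega
        have htne : s.take half ≠ [] := by
          intro hc
          have := congrArg List.length hc
          rw [List.length_take] at this
          simp only [List.length_nil] at this
          omega
        have hr : remBAux ds ds.length (s.take half) = gA ds (s.take half) := by
          apply ih (s.take half) (by simp; omega) htne
        rw [hr]
        have hrlen : (gA ds (s.take half)).length = ds.length - 1 := by
          apply gA_length ds _ hm1
          simp
          omega
        have hdne : s.drop half ≠ [] := by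
          intro hc
          have := congrArg List.length hc
          rw [List.length_drop] at this
          simp only [List.length_nil] at this
          omega
        have htlen2 : (gA ds (s.take half) ++ s.drop half).length = ds.length - 1 + (s.length - half) := by
          rw [List.length_append, List.length_drop, hrlen]
        have htlen : (gA ds (s.take half) ++ s.drop half).length < s.length := by
          rw [htlen2]
          omega
        rw [dif_pos htlen]
        rw [ih _ (by rw [htlen2]; omega) (by
              intro hc
              have := congrArg List.length hc
              rw [htlen2] at this
              simp only [List.length_nil] at this
              omega)]
        rw [gA_comp ds (s.take half) (s.drop half) hm1 (by simp; omega) hdne,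
            List.take_append_drop]

-- ===== VERDICT (by name: the statement is the Claim_ definition above) =====
theorem modulus_2_division_spec : Claim_equal_modulus_2_division := by
  intro dv ds _dom hpre
  obtain ⟨h1, h2⟩ := hpre
  unfold Spec_modulus_2_division
  rw [A_model dv ds h1 h2, modulus_2_division_alt]
  rw [remB_model ds.toList h2 dv.toList.length dv.toList le_rfl h1]
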